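-- pv_equiv track=rewrite | github.com/drguilhermecapel/medai | backend/app/services/laboratory_exam_service.py | _calcular_prioridade_geral
-- ===== SOURCE A (Python) =====
-- from enum import Enum
--
-- class ExamPriority(str, Enum):
--     """Prioridades de exames laboratoriais"""
--     URGENT = "urgente"
--     HIGH = "alta"
--     ROUTINE = "rotina"
--     SCREENING = "rastreamento"
--
-- def _calcular_prioridade_geral(exames: list) -> ExamPriority:
--     """Calcula a prioridade geral da solicitação"""
--
--     prioridades = [exame.get('prioridade', ExamPriority.ROUTINE) for exame in exames]
--
--     if ExamPriority.URGENT in prioridades: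
--         return ExamPriority.URGENT
--     elif ExamPriority.HIGH in prioridades:
--         return ExamPriority.HIGH
--     else:
--         return ExamPriority.ROUTINE
-- ===== SOURCE B (Python) =====
-- from enum import Enum
--
-- class ExamPriority(str, Enum):
--     URGENT = "urgente"
--     HIGH = "alta"
--     ROUTINE = "rotina"
--     SCREENING = "rastreamento"
--
-- def _calcular_prioridade_geral(exames: list) -> ExamPriority:
--     """Single pass with early exit instead of building a list and scanning it twice."""
--     has_high = False
--     for exame in exames:
--         p = exame.get('prioridade', ExamPriority.ROUTINE)
--         if p == ExamPriority.URGENT: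
--             return ExamPriority.URGENT
--         elif p == ExamPriority.HIGH:
--             has_high = True
--     return ExamPriority.HIGH if has_high else ExamPriority.ROUTINE
-- ===== Notes on version B (the rewrite author's own statement) =====
-- stated objective: simpler
-- what changed: One pass with an early return on URGENT and a has_high flag, instead of materializing the priority list and scanning it twice with membership tests.
import Mathlib
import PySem

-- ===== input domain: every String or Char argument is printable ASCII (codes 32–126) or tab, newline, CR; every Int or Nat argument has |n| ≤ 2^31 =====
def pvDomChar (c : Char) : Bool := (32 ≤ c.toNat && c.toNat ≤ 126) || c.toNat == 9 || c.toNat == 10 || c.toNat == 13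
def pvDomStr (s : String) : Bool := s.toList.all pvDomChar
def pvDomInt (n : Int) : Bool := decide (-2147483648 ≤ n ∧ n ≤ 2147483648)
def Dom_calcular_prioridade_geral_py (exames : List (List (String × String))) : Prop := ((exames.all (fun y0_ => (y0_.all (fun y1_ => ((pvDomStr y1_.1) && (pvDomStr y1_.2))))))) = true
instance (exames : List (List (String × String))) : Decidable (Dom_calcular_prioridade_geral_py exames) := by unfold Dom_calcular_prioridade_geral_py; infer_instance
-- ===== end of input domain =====

-- B is a single pass with early exit and a has_high flag instead of A's list build plus two membership scans; return value only.
-- ===== PORT A =====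
def calcular_prioridade_geral_py (exames : List (List (String × String))) : String :=
  let prioridades := exames.map (fun exame => (PySem.Dict.mk exame).getD "prioridade" "rotina")
  if prioridades.contains "urgente" then "urgente"
  else if prioridades.contains "alta" then "alta"
  else "rotina"

-- ===== PORT B =====
def calcPrioLoop : List (List (String × String)) → Bool → String
  | [], has_high => if has_high then "alta" else "rotina"
  | exame :: rest, has_high =>
    let p := (PySem.Dict.mk exame).getD "prioridade" "rotina"
    if p = "urgente" then "urgente"
    else calcPrioLoop rest (has_high || p = "alta")

def calcular_prioridade_geral_py_alt (exames : List (List (String × String))) : String :=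
  calcPrioLoop exames false

-- ===== PRECONDITION & SPEC =====
def Spec_calcular_prioridade_geral_py (exames : List (List (String × String))) (out : String) : Prop := out = calcular_prioridade_geral_py_alt exames
instance (exames : List (List (String × String))) (out : String) : Decidable (Spec_calcular_prioridade_geral_py exames out) := by unfold Spec_calcular_prioridade_geral_py; infer_instance

-- ===== CLAIM (what is proved, stated in full; the proofs are below) =====
def Claim_equal_calcular_prioridade_geral_py : Prop := ∀ (exames : List (List (String × String))), Dom_calcular_prioridade_geral_py exames → Spec_calcular_prioridade_geral_py exames (calcular_prioridade_geral_py exames)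

-- ===== LEMMAS AND PROOFS =====

theorem calcPrioLoop_eq (l : List (List (String × String))) (h : Bool) :
    calcPrioLoop l h =
      (let prios := l.map (fun exame => (PySem.Dict.mk exame).getD "prioridade" "rotina")
       if prios.contains "urgente" then "urgente"
       else if h || prios.contains "alta" then "alta" else "rotina") := by
  induction l generalizing h with
  | nil => simp [calcPrioLoop]
  | cons e rest ih =>
    simp only [calcPrioLoop, List.map_cons, List.contains_cons]
    by_cases hu : (PySem.Dict.mk e).getD "prioridade" "rotina" = "urgente"
    · simp [hu]
    · by_cases ha : (PySem.Dict.mk e).getD "prioridade" "rotina" = "alta" <;>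
        simp [hu, ha, Ne.symm hu, ih]
      simp [Ne.symm ha]

-- ===== VERDICT (by name: the statement is the Claim_ definition above) =====
theorem calcular_prioridade_geral_py_spec : Claim_equal_calcular_prioridade_geral_py := by
  intro exames _
  unfold Spec_calcular_prioridade_geral_py calcular_prioridade_geral_py calcular_prioridade_geral_py_alt
  rw [calcPrioLoop_eq]
  simp
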